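-- pv_equiv track=rewrite | github.com/dantetemplar/competitive-programming | Codeforces - Codeforces Round 1057 (Div. 2)/D_Не_одинок.py | solve
-- ===== SOURCE A (Python) =====
-- INF = 10**18
--
-- def solve(n: int, A: list[int]) -> int:
--     def cost_to_median(i, offset) -> int:
--         if i < 2:
--             return INF
--         M = [A[(i + offset) % n], A[(i - 1 + offset) % n], A[i - 2 + offset]]
--         M.sort()
--         return M[2] - M[0]
--
--     def calc(offset) -> int:
--         dp = [INF] * (n + 2)
--         dp[0] = 0
--         for i in range(1, n):
--             cost_pair = abs(A[(i + offset) % n] - A[(i - 1 + offset) % n]) + dp[i - 1]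
--             cost_triad = cost_to_median(i, offset) + (dp[i - 2] if i > 1 else 0)
--
--             dp[i + 1] = min(cost_pair, cost_triad)
--
--         return dp[n]
--
--     ans = INF
--     for j in range(3):
--         ans = min(ans, calc(j))
--
--     return ans
-- ===== SOURCE B (Python) =====
-- INF = 10**18
--
-- def solve(n: int, A: list[int]) -> int:
--     # Top-down memoized recursion: f(j) = min cost to cover the first j elements
--     # of the rotation by `offset`; a pair consumes 2 elements, a triad 3.
--     # f is written as a generator and driven by a trampoline so that deep
--     # recursion never touches Python's native call stack.
--     def run(offset: int) -> int:
--         memo = {}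
--
--         def a(k: int) -> int:
--             return A[(k + offset) % n]
--
--         def f(j: int):
--             if j <= 0:
--                 return 0
--             if j == 1:
--                 return INF
--             if j in memo:
--                 return memo[j]
--             pair = abs(a(j - 1) - a(j - 2)) + (yield j - 2)
--             if j >= 3:
--                 m = sorted((a(j - 1), a(j - 2), A[j - 3 + offset]))
--                 triad = (m[2] - m[0]) + (yield j - 3)
--             else:
--                 triad = INF
--             memo[j] = res = min(pair, triad)
--             return res
--
--         def trampoline(j: int) -> int:
--             stack, result = [f(j)], None
--             while stack:
--                 try:
--                     sub = stack[-1].send(result)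
--                 except StopIteration as done:
--                     result = done.value
--                     stack.pop()
--                     continue
--                 stack.append(f(sub))
--                 result = None
--             return result
--
--         return trampoline(n)
--
--     return min([INF] + [run(off) for off in range(3)])
-- ===== Notes on version B (the rewrite author's own statement) =====
-- stated objective: alternative
-- what changed: Replaces A's bottom-up dp array per offset with a top-down memoized recursion f(j) = min cost to cover the first j elements (pair from f(j-2), triad from f(j-3)), taking the min over the three offsets.
-- crash fix: On n <= -2 A raises IndexError (dp[0] assignment on an empty dp list) while B returns 0. — e.g. on solve(-2, []): A raises IndexError, B returns 0
import Mathlib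
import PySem

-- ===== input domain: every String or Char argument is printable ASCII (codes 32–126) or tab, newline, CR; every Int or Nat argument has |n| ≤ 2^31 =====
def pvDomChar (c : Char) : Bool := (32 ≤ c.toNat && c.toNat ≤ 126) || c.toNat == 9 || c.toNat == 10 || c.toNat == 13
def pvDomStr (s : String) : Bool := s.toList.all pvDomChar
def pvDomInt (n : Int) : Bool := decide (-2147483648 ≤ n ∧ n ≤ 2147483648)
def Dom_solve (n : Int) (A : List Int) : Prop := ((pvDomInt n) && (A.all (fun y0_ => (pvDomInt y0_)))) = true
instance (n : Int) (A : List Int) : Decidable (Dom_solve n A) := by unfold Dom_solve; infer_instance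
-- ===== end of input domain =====

-- B replaces A's bottom-up dp array (per offset) by a top-down recursion
-- f(j) = min cost to cover the first j elements (objective: alternative decomposition).

def INFv : Int := 10 ^ 18

-- ===== PORT A =====
-- A[(k + offset) % n]  (pyGetD: total form; Pre_solve keeps the index in range)
def aIdxA (n : Int) (A : List Int) (offset k : Int) : Int :=
  PySem.List.pyGetD A (PySem.Int.mod (k + offset) n) 0

def costToMedian (n : Int) (A : List Int) (offset i : Int) : Int :=
  if i < 2 then INFv
  else
    let M := PySem.List.sorted
      [aIdxA n A offset i, aIdxA n A offset (i - 1), PySem.List.pyGetD A (i - 2 + offset) 0]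
      (fun x => x) false
    PySem.List.pyGetD M 2 0 - PySem.List.pyGetD M 0 0

def stepA (n : Int) (A : List Int) (offset : Int) (dp : List Int) (i : Int) : List Int :=
  let costPair := |aIdxA n A offset i - aIdxA n A offset (i - 1)| + PySem.List.pyGetD dp (i - 1) 0
  let costTriad := costToMedian n A offset i + (if 1 < i then PySem.List.pyGetD dp (i - 2) 0 else 0)
  PySem.List.pySetD dp (i + 1) (min costPair costTriad)

def calcA (n : Int) (A : List Int) (offset : Int) : Int :=
  let dp0 := PySem.List.pySetD (List.replicate (n + 2).toNat INFv) 0 0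
  let dp := (PySem.List.pyRange 1 n 1).foldl (stepA n A offset) dp0
  PySem.List.pyGetD dp n 0

def solve (n : Int) (A : List Int) : Int :=
  (PySem.List.pyRange 0 3 1).foldl (fun ans j => min ans (calcA n A j)) INFv

-- ===== PORT B =====
def aIdxB (n : Int) (A : List Int) (offset k : Int) : Int :=
  PySem.List.pyGetD A (PySem.Int.mod (k + offset) n) 0

-- f(j): j ≤ 0 → 0, j = 1 → INF, j = 2 → no triad possible, j ≥ 3 → pair or triad
def fB (n : Int) (A : List Int) (offset : Int) : Nat → Int
  | 0 => 0
  | 1 => INFv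
  | 2 => min (|aIdxB n A offset 1 - aIdxB n A offset 0| + fB n A offset 0) INFv
  | (j + 3) =>
    let pair := |aIdxB n A offset ((j : Int) + 2) - aIdxB n A offset ((j : Int) + 1)| +
      fB n A offset (j + 1)
    let m := PySem.List.sorted
      [aIdxB n A offset ((j : Int) + 2), aIdxB n A offset ((j : Int) + 1),
       PySem.List.pyGetD A ((j : Int) + offset) 0] (fun x => x) false
    let triad := (PySem.List.pyGetD m 2 0 - PySem.List.pyGetD m 0 0) + fB n A offset j
    min pair triad

def solve_alt (n : Int) (A : List Int) : Int :=
  min (min (min INFv (fB n A 0 n.toNat)) (fB n A 1 n.toNat)) (fB n A 2 n.toNat)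

-- ===== PRECONDITION & SPEC =====
-- Pre_solve = exactly the inputs on which the Python A returns: the degenerate sizes
-- n ∈ {-1,0,1} (the loop never indexes A), or 2 ≤ n ≤ len(A); elsewhere A raises IndexError.
def Pre_solve (n : Int) (A : List Int) : Prop :=
  (-1 ≤ n ∧ n ≤ 1) ∨ (2 ≤ n ∧ n ≤ (A.length : Int))
instance (n : Int) (A : List Int) : Decidable (Pre_solve n A) := by unfold Pre_solve; infer_instance

def pvWitness_solve : Int × List Int := (4, [3, 1, 4, 1])

-- A raises IndexError (the dp[0] assignment on an empty dp list) whenever n ≤ -2; B returns 0 there.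
def Raises_solve (n : Int) (A : List Int) : Prop := n ≤ -2
instance (n : Int) (A : List Int) : Decidable (Raises_solve n A) := by unfold Raises_solve; infer_instance
def pvRaiseWitness_solve : Int × List Int := (-2, [])
def pvRaiseWitnessOut_solve : Int := 0

def Spec_solve (n : Int) (A : List Int) (out : Int) : Prop := out = solve_alt n A
instance (n : Int) (A : List Int) (out : Int) : Decidable (Spec_solve n A out) := by unfold Spec_solve; infer_instance

-- ===== CLAIM (what is proved, stated in full; the proofs are below) =====
def Claim_equal_solve : Prop := ∀ (n : Int) (A : List Int), Dom_solve n A → Pre_solve n A → Spec_solve n A (solve n A)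
def Claim_raises_solve : Prop := (∀ (n : Int) (A : List Int), Dom_solve n A → Raises_solve n A → ¬ Pre_solve n A) ∧ (Dom_solve (pvRaiseWitness_solve.1) (pvRaiseWitness_solve.2) ∧ Raises_solve (pvRaiseWitness_solve.1) (pvRaiseWitness_solve.2) ∧ solve_alt (pvRaiseWitness_solve.1) (pvRaiseWitness_solve.2) = pvRaiseWitnessOut_solve)

-- ===== LEMMAS AND PROOFS =====

lemma aIdx_eq : aIdxA = aIdxB := rfl

lemma getD_set (xs : List Int) (i : Nat) (v : Int) (k : Nat) (hi : i < xs.length) :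
    (xs.set i v).getD k 0 = if k = i then v else xs.getD k 0 := by
  simp only [List.getD, List.getElem?_set, hi, if_true]
  by_cases h : i = k
  · subst h; simp
  · simp [h]; intro h'; exact absurd h'.symm h

lemma getD_dp0 (t : Nat) (k : Nat) (hk : k < t) (h0 : 0 < t) :
    ((List.replicate t INFv).set 0 0).getD k 0 = if k = 0 then 0 else INFv := by
  rw [getD_set _ _ _ _ (by simpa using h0)]
  by_cases h : k = 0
  · simp [h]
  · simp [h, List.getD, hk]

-- the value A's loop body writes at position m+2 is exactly fB (m+2)
lemma step_val (n : Int) (A : List Int) (offset : Int) (m : Nat) (hm : (m : Int) + 2 ≤ n)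
    (dp : List Int)
    (hget : ∀ k : Nat, k < (n + 2).toNat → dp.getD k 0 = if k ≤ m + 1 then fB n A offset k else INFv) :
    stepA n A offset dp ((m : Int) + 1) = dp.set (m + 2) (fB n A offset (m + 2)) := by
  have e1 : ((m : Int) + 1 + 1) = ((m + 2 : Nat) : Int) := by push_cast; ring
  have e2 : ((m : Int) + 1 - 1) = ((m : Nat) : Int) := by ring_nf
  have hmlt : m < (n + 2).toNat := by omega
  unfold stepA
  rw [e1, e2, PySem.List.pySetD_natCast, PySem.List.pyGetD_natCast,
    hget m hmlt, if_pos (by omega)]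
  match m with
  | 0 =>
    norm_num [costToMedian, fB, aIdx_eq]
  | (m' + 1) =>
    have e3 : ((m' + 1 : Nat) : Int) + 1 - 2 = ((m' : Nat) : Int) := by push_cast; ring
    have e4 : ((m' + 1 : Nat) : Int) + 1 = (m' : Int) + 2 := by push_cast; ring
    rw [e3, PySem.List.pyGetD_natCast, hget m' (by omega), if_pos (by omega),
      if_pos (by omega), e4]
    norm_num [costToMedian, fB, aIdx_eq]
    rw [if_neg (by omega), show ((m' : Int) + 2 - 1) = (m' : Int) + 1 from by ring]

-- invariant of A's dp loop: after the iterations i = 1 .. m+1 the dp list holds fB at 0 .. m+2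
lemma invA (n : Int) (A : List Int) (offset : Int) (hn : 2 ≤ n) :
    ∀ (m : Nat), ((m : Int) + 1 ≤ n) →
    ∃ dp, (PySem.List.pyRange 1 ((m : Int) + 1) 1).foldl (stepA n A offset)
        ((List.replicate (n + 2).toNat INFv).set 0 0) = dp ∧
      dp.length = (n + 2).toNat ∧
      ∀ k : Nat, k < (n + 2).toNat → dp.getD k 0 = if k ≤ m + 1 then fB n A offset k else INFv := by
  intro m
  induction m with
  | zero =>
    intro _
    refine ⟨_, by rw [PySem.List.pyRange_one_eq_nil (by norm_num), List.foldl_nil], by simp, ?_⟩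
    intro k hk
    rw [getD_dp0 _ _ hk (by omega)]
    match k with
    | 0 => simp [fB]
    | 1 => simp [fB]
    | (j + 2) => simp
  | succ m ih =>
    intro hm
    have hm2 : (m : Int) + 2 ≤ n := by push_cast at hm; omega
    obtain ⟨dp, hdp, hlen, hget⟩ := ih (by omega)
    refine ⟨dp.set (m + 2) (fB n A offset (m + 2)), ?_, by simp [hlen], ?_⟩
    · rw [show (((m + 1 : Nat) : Int) + 1) = ((m : Int) + 1) + 1 from by push_cast; ring,
        PySem.List.pyRange_one_succ_right (by omega), List.foldl_append, hdp]
      simp only [List.foldl_cons, List.foldl_nil]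
      exact step_val n A offset m hm2 dp hget
    · intro k hk
      rw [getD_set _ _ _ _ (by omega)]
      by_cases hke : k = m + 2
      · rw [if_pos hke, if_pos (by omega), hke]
      · rw [if_neg hke, hget k hk]
        by_cases hk2 : k ≤ m + 1
        · rw [if_pos hk2, if_pos (by omega)]
        · rw [if_neg hk2, if_neg (by omega)]

lemma dp0_eq (t : Nat) :
    PySem.List.pySetD (List.replicate t INFv) 0 0 = (List.replicate t INFv).set 0 0 := by
  rw [PySem.List.pySetD_of_nonneg (List.replicate t INFv) 0 (by norm_num)]
  norm_num

lemma calc_eq (n : Int) (A : List Int) (offset : Int) :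
    calcA n A offset = fB n A offset n.toNat := by
  have hcalc : calcA n A offset = PySem.List.pyGetD
      ((PySem.List.pyRange 1 n 1).foldl (stepA n A offset)
        ((List.replicate (n + 2).toNat INFv).set 0 0)) n 0 := by
    unfold calcA; rw [dp0_eq]
  rcases (by omega : 2 ≤ n ∨ n < 2) with h | h
  · obtain ⟨dp, hdp, hlen, hget⟩ := invA n A offset h (n.toNat - 1) (by omega)
    rw [hcalc]
    rw [show PySem.List.pyRange 1 n 1
        = PySem.List.pyRange 1 (((n.toNat - 1 : Nat) : Int) + 1) 1 from by
          congr 1; omega,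
      hdp,
      PySem.List.pyGetD_eq_getElem dp 0 (by omega) (by rw [hlen]; omega)]
    rw [show dp[n.toNat] = dp.getD n.toNat 0 from (List.getD_eq_getElem dp 0 (by rw [hlen]; omega)).symm,
      hget n.toNat (by omega), if_pos (by omega)]
  · by_cases h1 : n = 1
    · subst h1; rfl
    · by_cases h0 : n = 0
      · subst h0; rfl
      · by_cases hm1 : n = -1
        · subst hm1; rfl
        · -- n ≤ -2: empty dp, empty loop, dp[n] defaults, fB 0 = 0
          have ht : (n + 2).toNat = 0 := by omega
          have hnt : n.toNat = 0 := by omega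
          rw [hcalc, PySem.List.pyRange_one_eq_nil (by omega), List.foldl_nil, ht, hnt]
          simp [PySem.List.pyGetD,
            PySem.List.pyGet?, fB, PySem.List.pyIdx?]

-- ===== VERDICT (by name: the statement is the Claim_ definition above) =====
theorem solve_spec : Claim_equal_solve := by
  intro n A _ _
  unfold Spec_solve solve solve_alt
  rw [show PySem.List.pyRange 0 3 1 = [0, 1, 2] from by decide]
  simp [List.foldl, calc_eq n A]

theorem solve_raises : Claim_raises_solve := by
  unfold Claim_raises_solve
  exact ⟨by intro n A _ hr hp; unfold Raises_solve at hr; unfold Pre_solve at hp; omega, by decide⟩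

-- self-check: the raise witness really lies in the raises region (reuses solve_raises)
theorem solve_raises_witness :
    Raises_solve pvRaiseWitness_solve.1 pvRaiseWitness_solve.2 := solve_raises.2.2.1
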